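-- pv_equiv track=rewrite | github.com/079035/nascent-rag | main.py | process_sentence_pairs
-- ===== SOURCE A (Python) =====
-- def process_sentence_pairs(sentences):
--         paired_sentences = []
--         i = 0
--         while i < len(sentences):
--             if i + 1 < len(sentences):
--                 pair = f"{sentences[i]} {sentences[i+1]}"
--                 paired_sentences.append(pair)
--                 i += 2
--             else:
--                 paired_sentences.append(sentences[i])  # Last sentence alone if odd
--                 i += 1
--         return paired_sentences
-- ===== SOURCE B (Python) =====
-- def process_sentence_pairs(sentences):
--     paired, pending = [], None
--     for s in sentences:
--         if pending is None:
--             pending = s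
--         else:
--             paired.append(f"{pending} {s}")
--             pending = None
--     if pending is not None:
--         paired.append(pending)
--     return paired
-- ===== Notes on version B (the rewrite author's own statement) =====
-- stated objective: alternative
-- what changed: Replaces A's index-stepping while loop (i advances by 2 with guarded sentences[i], sentences[i+1] lookups) by an index-free single pass over the elements that maintains a 'pending' first-of-pair state: each element either becomes pending or is joined with the pending one, and a leftover pending element is flushed after the loop.
import Mathlib
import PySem

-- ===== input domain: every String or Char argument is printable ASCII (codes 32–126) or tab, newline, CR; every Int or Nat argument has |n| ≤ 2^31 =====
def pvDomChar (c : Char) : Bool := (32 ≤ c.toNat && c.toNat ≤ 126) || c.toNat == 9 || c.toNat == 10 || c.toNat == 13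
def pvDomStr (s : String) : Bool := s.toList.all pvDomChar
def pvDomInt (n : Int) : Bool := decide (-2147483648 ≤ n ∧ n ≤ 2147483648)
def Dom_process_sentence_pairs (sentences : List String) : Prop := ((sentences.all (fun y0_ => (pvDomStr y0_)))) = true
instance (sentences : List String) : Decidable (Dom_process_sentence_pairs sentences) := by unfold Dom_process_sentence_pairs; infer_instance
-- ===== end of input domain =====

-- B replaces A's index-stepping while loop by an index-free single pass with a 'pending'
-- first-of-pair accumulator flushed after the loop (alternative decomposition; same O(n) cost).


-- ===== PORT A =====
-- A's while loop: index i, append either the joined pair (f"{sentences[i]} {sentences[i+1]}")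
-- or the lone last sentence; i advances by 2 or 1.  (Indexing is guarded by i < len, so getD is exact.)
def pairLoopA (s : List String) (acc : List String) (i : Nat) : List String :=
  if i < s.length then
    if i + 1 < s.length then
      pairLoopA s (acc ++ [s.getD i "" ++ " " ++ s.getD (i + 1) ""]) (i + 2)
    else
      pairLoopA s (acc ++ [s.getD i ""]) (i + 1)
  else acc
termination_by s.length - i
decreasing_by all_goals omega

def process_sentence_pairs (sentences : List String) : List String :=
  pairLoopA sentences [] 0

-- ===== PORT B =====
-- B's for loop body: state = (paired list so far, pending first-of-pair).
def pairStepB (st : List String × Option String) (s : String) : List String × Option String :=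
  match st.2 with
  | none => (st.1, some s)
  | some p => (st.1 ++ [p ++ " " ++ s], none)

def process_sentence_pairs_alt (sentences : List String) : List String :=
  let st := sentences.foldl pairStepB ([], none)
  match st.2 with
  | none => st.1
  | some p => st.1 ++ [p]

-- ===== PRECONDITION & SPEC =====
def Spec_process_sentence_pairs (sentences : List String) (out : List String) : Prop := out = process_sentence_pairs_alt sentences
instance (sentences : List String) (out : List String) : Decidable (Spec_process_sentence_pairs sentences out) := by unfold Spec_process_sentence_pairs; infer_instance

-- ===== CLAIM (what is proved, stated in full; the proofs are below) =====
def Claim_equal_process_sentence_pairs : Prop := ∀ (sentences : List String), Dom_process_sentence_pairs sentences → Spec_process_sentence_pairs sentences (process_sentence_pairs sentences)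

-- ===== LEMMAS AND PROOFS =====

-- Common characterisation both ports are reduced to: join consecutive pairs, lone tail if odd.
def pvPairs : List String → List String
  | [] => []
  | [x] => [x]
  | x :: y :: r => (x ++ " " ++ y) :: pvPairs r

theorem pairLoopA_eq (s acc : List String) (i : Nat) :
    pairLoopA s acc i = acc ++ pvPairs (s.drop i) := by
  induction acc, i using pairLoopA.induct s with
  | case1 acc i h1 h2 ih =>
      rw [pairLoopA, if_pos h1, if_pos h2, ih]
      have hd : s.drop i = s[i] :: s[i+1] :: s.drop (i + 2) := by
        rw [← List.getElem_cons_drop h1, ← List.getElem_cons_drop h2]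
      rw [hd]
      simp [pvPairs, List.getElem?_eq_getElem h1, List.getElem?_eq_getElem h2]
  | case2 acc i h1 h2 ih =>
      rw [pairLoopA, if_pos h1, if_neg h2, ih]
      have hd : s.drop i = [s[i]] := by
        rw [← List.getElem_cons_drop h1, List.drop_eq_nil_of_le (by omega)]
      rw [hd, List.drop_eq_nil_of_le (by omega : s.length ≤ i + 1)]
      simp [pvPairs, List.getElem?_eq_getElem h1]
  | case3 acc i h1 =>
      rw [pairLoopA, if_neg h1, List.drop_eq_nil_of_le (by omega)]
      simp [pvPairs]

def pvFinish (st : List String × Option String) : List String :=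
  match st.2 with
  | none => st.1
  | some p => st.1 ++ [p]

theorem foldB_eq (s : List String) : ∀ acc : List String,
    pvFinish (s.foldl pairStepB (acc, none)) = acc ++ pvPairs s := by
  induction s using pvPairs.induct with
  | case1 => intro acc; simp [pvFinish, pvPairs]
  | case2 x => intro acc; simp [pvFinish, pvPairs, pairStepB]
  | case3 x y r ih =>
      intro acc
      have : (x :: y :: r).foldl pairStepB (acc, none)
           = r.foldl pairStepB (acc ++ [x ++ " " ++ y], none) := by
        simp [List.foldl, pairStepB]
      rw [this, ih]
      simp [pvPairs]

-- ===== VERDICT (by name: the statement is the Claim_ definition above) =====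
theorem process_sentence_pairs_spec : Claim_equal_process_sentence_pairs := by
  intro s _
  unfold Spec_process_sentence_pairs process_sentence_pairs process_sentence_pairs_alt
  rw [pairLoopA_eq]
  have := foldB_eq s []
  simp only [List.nil_append] at this
  simpa [pvFinish] using this.symm
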